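-- pv_equiv track=rewrite | github.com/agentcures/refua | src/refua/protein.py | _antibody_unpaired_cysteine_count
-- ===== SOURCE A (Python) =====
-- def _antibody_unpaired_cysteine_count(sequence: str) -> int:
--     cysteine_positions = [idx for idx, residue in enumerate(sequence) if residue == "C"]
--     paired: set[int] = set()
--     for idx in range(len(cysteine_positions) - 1):
--         left = cysteine_positions[idx]
--         right = cysteine_positions[idx + 1]
--         if abs(right - left) in (1, 2):
--             paired.update({left, right})
--     return sum(1 for idx in cysteine_positions if idx not in paired)
-- ===== SOURCE B (Python) =====
-- def _antibody_unpaired_cysteine_count(sequence: str) -> int: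
--     positions = [idx for idx, residue in enumerate(sequence) if residue == "C"]
--     count = 0
--     prev_close = False
--     for p, q in zip(positions, positions[1:] + [None]):
--         nxt_close = q is not None and q - p <= 2
--         if not (prev_close or nxt_close):
--             count += 1
--         prev_close = nxt_close
--     return count
-- ===== Notes on version B (the rewrite author's own statement) =====
-- stated objective: simpler
-- what changed: Replaces the paired-set construction plus membership recount with a single pass over consecutive cysteine pairs carrying one boolean (closeness to the previous cysteine), counting a cysteine when neither neighbour is within distance 2.
import Mathlib
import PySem

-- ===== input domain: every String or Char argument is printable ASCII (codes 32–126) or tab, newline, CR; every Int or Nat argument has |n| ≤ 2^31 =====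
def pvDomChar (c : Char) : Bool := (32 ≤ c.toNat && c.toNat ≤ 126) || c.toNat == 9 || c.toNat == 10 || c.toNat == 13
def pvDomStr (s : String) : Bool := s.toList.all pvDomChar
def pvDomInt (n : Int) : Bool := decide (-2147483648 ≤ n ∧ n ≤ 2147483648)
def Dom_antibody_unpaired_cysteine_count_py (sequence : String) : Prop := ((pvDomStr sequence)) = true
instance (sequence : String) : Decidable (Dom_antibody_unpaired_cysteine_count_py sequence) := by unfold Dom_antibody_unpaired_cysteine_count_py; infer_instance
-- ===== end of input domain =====

-- B replaces A's paired-set construction + recount with a single pass over consecutive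
-- cysteine pairs carrying one boolean (closeness to the previous cysteine); same results.

-- ===== PORT A =====
def antibody_unpaired_cysteine_count_py (sequence : String) : Int :=
  let cysteine_positions : List Int :=
    ((PySem.List.enumerate sequence.toList 0).filter (fun pr => pr.2 == 'C')).map (fun pr => pr.1)
  let paired : PySem.Set Int :=
    (PySem.List.pyRange 0 ((cysteine_positions.length : Int) - 1) 1).foldl
      (fun paired idx =>
        let left := PySem.List.pyGetD cysteine_positions idx 0
        let right := PySem.List.pyGetD cysteine_positions (idx + 1) 0
        if |right - left| = 1 ∨ |right - left| = 2 then
          PySem.Set.update paired (PySem.Set.ofList [left, right])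
        else paired)
      PySem.Set.empty
  cysteine_positions.foldl
    (fun acc idx => if PySem.Set.contains paired idx then acc else acc + 1) 0

-- ===== PORT B =====
-- loop body of B's single pass (carry: count so far, closeness to the previous cysteine)
def pvStep (st : Int × Bool) (pq : Int × Option Int) : Int × Bool :=
  let nxt_close : Bool := match pq.2 with
    | some q => decide (q - pq.1 ≤ 2)
    | none => false
  ((if st.2 || nxt_close then st.1 else st.1 + 1), nxt_close)

def antibody_unpaired_cysteine_count_py_alt (sequence : String) : Int :=
  let positions : List Int :=
    ((PySem.List.enumerate sequence.toList 0).filter (fun pr => pr.2 == 'C')).map (fun pr => pr.1)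
  let nexts : List (Option Int) := positions.tail.map some ++ [none]
  ((positions.zip nexts).foldl pvStep (0, false)).1

-- ===== PRECONDITION & SPEC =====
def Spec_antibody_unpaired_cysteine_count_py (sequence : String) (out : Int) : Prop := out = antibody_unpaired_cysteine_count_py_alt sequence
instance (sequence : String) (out : Int) : Decidable (Spec_antibody_unpaired_cysteine_count_py sequence out) := by unfold Spec_antibody_unpaired_cysteine_count_py; infer_instance

-- ===== CLAIM (what is proved, stated in full; the proofs are below) =====
def Claim_equal_antibody_unpaired_cysteine_count_py : Prop := ∀ (sequence : String), Dom_antibody_unpaired_cysteine_count_py sequence → Spec_antibody_unpaired_cysteine_count_py sequence (antibody_unpaired_cysteine_count_py sequence)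

-- ===== LEMMAS AND PROOFS =====

-- B's one-pass recursion, extracted: carry pc = "head is within 2 of the previous cysteine".
def pvGo : List Int → Bool → Int
  | [], _ => 0
  | p :: rest, pc =>
    let nc : Bool := match rest with
      | q :: _ => decide (q - p ≤ 2)
      | [] => false
    (if pc || nc then 0 else 1) + pvGo rest nc

-- Structural membership predicate for A's paired set (A's |gap| ∈ {1,2} condition).
def pvMp : Bool → List Int → Int → Bool
  | _, [], _ => false
  | pc, p :: rest, x =>
    let nc : Bool := match rest with
      | q :: _ => decide (|q - p| = 1 ∨ |q - p| = 2)
      | [] => false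
    ((pc || nc) && (x == p)) || pvMp nc rest x

theorem pvMp_mem {pc : Bool} {l : List Int} {x : Int} (h : pvMp pc l x = true) : x ∈ l := by
  induction l generalizing pc with
  | nil => simp [pvMp] at h
  | cons p rest ih =>
    simp only [pvMp, Bool.or_eq_true, Bool.and_eq_true, beq_iff_eq] at h
    rcases h with ⟨_, rfl⟩ | h
    · exact List.mem_cons_self
    · exact List.mem_cons_of_mem _ (ih h)

theorem pv_sorted (s : String) :
    (((PySem.List.enumerate s.toList 0).filter (fun pr => pr.2 == 'C')).map (fun pr => pr.1)).Pairwise (· < ·) := by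
  rw [List.pairwise_map]
  exact (PySem.List.pairwise_lt_enumerate s.toList 0).filter _

-- the pyRange-indexed loop over consecutive pairs is a fold over zip P P.tail
theorem pv_range_to_zip {α : Type} (P : List Int) (f : α → Int → Int → α) (init : α) :
    (PySem.List.pyRange 0 ((P.length : Int) - 1) 1).foldl
      (fun acc idx => f acc (PySem.List.pyGetD P idx 0) (PySem.List.pyGetD P (idx + 1) 0)) init
    = (P.zip P.tail).foldl (fun acc pq => f acc pq.1 pq.2) init := by
  cases P with
  | nil => simp [PySem.List.pyRange_one_eq_nil (by norm_num : (-1 : Int) ≤ 0)]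
  | cons p rest =>
    have hlen : (((p :: rest).length : Int)) - 1 = (((p :: rest).zip rest).length : Int) := by
      simp [List.length_zip]
    simp only [List.tail_cons]
    rw [hlen]
    rw [← PySem.List.foldl_pyRange_zero_pyGetD' ((p :: rest).zip rest) ((0 : Int), (0 : Int))
        (fun acc pq => f acc pq.1 pq.2) init]
    apply PySem.List.foldl_congr_mem
    intro acc k hk
    rw [PySem.List.mem_pyRange_one] at hk
    obtain ⟨hk0, hkZ⟩ := hk
    have h1 : k < (((p :: rest)).length : Int) := by
      simp [List.length_zip] at hkZ ⊢; omega
    have h2 : k + 1 < (((p :: rest)).length : Int) := by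
      simp [List.length_zip] at hkZ ⊢; omega
    rw [PySem.List.pyGetD_eq_getElem _ 0 hk0 h1,
        PySem.List.pyGetD_eq_getElem _ 0 (by omega) h2,
        PySem.List.pyGetD_eq_getElem _ ((0 : Int), (0 : Int)) hk0 hkZ]
    have ht : (k + 1).toNat = k.toNat + 1 := by omega
    simp [List.getElem_zip, ht]

-- membership in the set built by the zip fold
theorem pv_mem_zipfold (Z : List (Int × Int)) (s : PySem.Set Int) (x : Int) :
    x ∈ Z.foldl
      (fun acc pq =>
        if |pq.2 - pq.1| = 1 ∨ |pq.2 - pq.1| = 2 then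
          PySem.Set.update acc (PySem.Set.ofList [pq.1, pq.2])
        else acc) s
    ↔ x ∈ s ∨ ∃ pq ∈ Z, (|pq.2 - pq.1| = 1 ∨ |pq.2 - pq.1| = 2) ∧ (x = pq.1 ∨ x = pq.2) := by
  induction Z generalizing s with
  | nil => simp
  | cons pq Z ih =>
    simp only [List.foldl_cons, ih, List.mem_cons]
    by_cases h : |pq.2 - pq.1| = 1 ∨ |pq.2 - pq.1| = 2
    · simp only [if_pos h, PySem.Set.mem_update, PySem.Set.mem_ofList]
      constructor
      · rintro (⟨hs | hm⟩ | hex)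
        · exact Or.inl hs
        · exact Or.inr ⟨pq, Or.inl rfl, h, by simpa using hm⟩
        · obtain ⟨q, hq, hc, hx⟩ := hex; exact Or.inr ⟨q, Or.inr hq, hc, hx⟩
      · rintro (hs | ⟨q, (rfl | hq), hc, hx⟩)
        · exact Or.inl (Or.inl hs)
        · exact Or.inl (Or.inr (by simpa using hx))
        · exact Or.inr ⟨q, hq, hc, hx⟩
    · simp only [if_neg h]
      constructor
      · rintro (hs | hex)
        · exact Or.inl hs
        · obtain ⟨q, hq, hc, hx⟩ := hex; exact Or.inr ⟨q, Or.inr hq, hc, hx⟩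
      · rintro (hs | ⟨q, (rfl | hq), hc, hx⟩)
        · exact Or.inl hs
        · exact absurd hc h
        · exact Or.inr ⟨q, hq, hc, hx⟩
      
-- pvMp characterises that existential (with the carry for the head)
theorem pv_mp_iff (P : List Int) (pc : Bool) (x : Int) :
    pvMp pc P x = true
    ↔ (pc = true ∧ ∃ h, P.head? = some h ∧ x = h)
      ∨ ∃ pq ∈ P.zip P.tail, (|pq.2 - pq.1| = 1 ∨ |pq.2 - pq.1| = 2) ∧ (x = pq.1 ∨ x = pq.2) := by
  induction P generalizing pc with
  | nil => simp [pvMp]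
  | cons p rest ih =>
    cases rest with
    | nil =>
      simp [pvMp]
      exact fun _ => eq_comm
    | cons q r =>
      rw [show pvMp pc (p :: q :: r) x
          = (((pc || decide (|q - p| = 1 ∨ |q - p| = 2)) && (x == p))
             || pvMp (decide (|q - p| = 1 ∨ |q - p| = 2)) (q :: r) x) from rfl]
      rw [Bool.or_eq_true, Bool.and_eq_true, ih]
      simp only [List.head?_cons, Option.some.injEq, List.tail_cons, List.zip_cons_cons,
        List.mem_cons, Bool.or_eq_true, decide_eq_true_eq, beq_iff_eq]
      constructor
      · rintro (⟨hpcnc, hxp⟩ | ⟨hnc, h, hqh, hxh⟩ | ⟨pq, hpq, hcl, hx⟩)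
        · rcases hpcnc with hpc | hnc
          · exact Or.inl ⟨hpc, p, rfl, hxp⟩
          · exact Or.inr ⟨(p, q), Or.inl rfl, hnc, Or.inl hxp⟩
        · exact Or.inr ⟨(p, q), Or.inl rfl, hnc, Or.inr (hxh.trans hqh.symm)⟩
        · exact Or.inr ⟨pq, Or.inr hpq, hcl, hx⟩
      · rintro (⟨hpc, h, hph, hxh⟩ | ⟨pq, (rfl | hpq), hcl, hx⟩)
        · exact Or.inl ⟨Or.inl hpc, hxh.trans hph.symm⟩
        · rcases hx with hx1 | hx2
          · exact Or.inl ⟨Or.inr hcl, hx1⟩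
          · exact Or.inr (Or.inl ⟨hcl, q, rfl, hx2⟩)
        · exact Or.inr (Or.inr ⟨pq, hpq, hcl, hx⟩)

-- A's counting fold in terms of countP
theorem pv_count_fold (l : List Int) (pred : Int → Bool) (c : Int) :
    l.foldl (fun acc x => if pred x then acc else acc + 1) c
    = c + (l.countP (fun x => !pred x) : Int) := by
  induction l generalizing c with
  | nil => simp
  | cons p rest ih =>
    simp only [List.foldl_cons, List.countP_cons, ih]
    by_cases h : pred p <;> simp [h] <;> push_cast <;> ring

-- main counting lemma: on a strictly increasing list, counting the non-members of
-- the paired set (pvMp) equals B's one-pass recursion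
theorem pv_main (P : List Int) (pc : Bool) (hs : P.Pairwise (· < ·)) :
    (P.countP (fun x => !pvMp pc P x) : Int) = pvGo P pc := by
  induction P generalizing pc with
  | nil => simp [pvGo]
  | cons p rest ih =>
    have hlt : ∀ x ∈ rest, p < x := fun x hx => (List.pairwise_cons.mp hs).1 x hx
    have hrest : rest.Pairwise (· < ·) := (List.pairwise_cons.mp hs).2
    cases rest with
    | nil =>
      simp [pvMp, pvGo, List.countP_cons]
      cases pc <;> simp
    | cons q r =>
      have hpq : p < q := hlt q List.mem_cons_self
      have hnc : (decide (|q - p| = 1 ∨ |q - p| = 2)) = (decide (q - p ≤ 2)) := by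
        have habs : |q - p| = q - p := abs_of_pos (by omega)
        simp only [decide_eq_decide, habs]
        omega
      have hhead : pvMp (decide (|q - p| = 1 ∨ |q - p| = 2)) (q :: r) p = false := by
        rcases h : pvMp (decide (|q - p| = 1 ∨ |q - p| = 2)) (q :: r) p
        · rfl
        · exact absurd (hlt p (pvMp_mem h)) (lt_irrefl p)
      have hcongr : ∀ x ∈ (q :: r),
          (!pvMp pc (p :: q :: r) x) = (!pvMp (decide (|q - p| = 1 ∨ |q - p| = 2)) (q :: r) x) := by
        intro x hx
        have hne : (x == p) = false := by
          have := hlt x hx; simp; omega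
        simp [pvMp, hne]
      rw [List.countP_cons, List.countP_congr (fun x hx => by rw [hcongr x hx])]
      have hheadval : (!pvMp pc (p :: q :: r) p) = !(pc || decide (|q - p| = 1 ∨ |q - p| = 2)) := by
        rw [show pvMp pc (p :: q :: r) p
            = ((pc || decide (|q - p| = 1 ∨ |q - p| = 2)) && (p == p)
               || pvMp (decide (|q - p| = 1 ∨ |q - p| = 2)) (q :: r) p) from rfl, hhead]
        simp
      rw [hheadval]
      rw [show pvGo (p :: q :: r) pc
          = (if pc || decide (q - p ≤ 2) then 0 else 1) + pvGo (q :: r) (decide (q - p ≤ 2)) from rfl]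
      rw [← hnc, ← ih _ hrest]
      cases hb : (pc || decide (|q - p| = 1 ∨ |q - p| = 2)) <;> simp [hb] <;> push_cast <;> ring

-- B's fold computes pvGo
theorem pv_alt_fold (P : List Int) (c : Int) (pc : Bool) :
    ((P.zip (P.tail.map some ++ [none])).foldl pvStep (c, pc)).1 = c + pvGo P pc := by
  induction P generalizing c pc with
  | nil => simp [pvGo]
  | cons p rest ih =>
    cases rest with
    | nil =>
      simp [pvGo, pvStep]
      cases pc <;> simp
    | cons q r =>
      simp only [List.tail_cons, List.map_cons, List.cons_append, List.zip_cons_cons,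
        List.foldl_cons]
      rw [show pvStep (c, pc) (p, some q)
          = ((if pc || decide (q - p ≤ 2) then c else c + 1), decide (q - p ≤ 2)) from rfl]
      rw [show (List.map some r ++ [none]) = ((q :: r).tail.map some ++ [none]) from by simp]
      rw [ih]
      rw [show pvGo (p :: q :: r) pc
          = (if pc || decide (q - p ≤ 2) then 0 else 1) + pvGo (q :: r) (decide (q - p ≤ 2)) from rfl]
      cases hb : (pc || decide (q - p ≤ 2)) <;> simp [hb] <;> ring

-- ===== VERDICT (by name: the statement is the Claim_ definition above) =====
theorem antibody_unpaired_cysteine_count_py_spec : Claim_equal_antibody_unpaired_cysteine_count_py := by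
  intro s _
  unfold Spec_antibody_unpaired_cysteine_count_py
  simp only [antibody_unpaired_cysteine_count_py, antibody_unpaired_cysteine_count_py_alt]
  set P : List Int :=
    ((PySem.List.enumerate s.toList 0).filter (fun pr => pr.2 == 'C')).map (fun pr => pr.1) with hP
  have hsorted : P.Pairwise (· < ·) := by rw [hP]; exact pv_sorted s
  rw [pv_range_to_zip P
    (fun acc l r => if |r - l| = 1 ∨ |r - l| = 2 then
        PySem.Set.update acc (PySem.Set.ofList [l, r]) else acc) PySem.Set.empty]
  rw [pv_count_fold, pv_alt_fold]
  simp only [zero_add]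
  rw [← pv_main P false hsorted]
  congr 1
  apply List.countP_congr
  intro x _
  congr 1
  have hmem : PySem.Set.contains
      ((P.zip P.tail).foldl
        (fun acc pq =>
          if |pq.2 - pq.1| = 1 ∨ |pq.2 - pq.1| = 2 then
            PySem.Set.update acc (PySem.Set.ofList [pq.1, pq.2])
          else acc) PySem.Set.empty) x = pvMp false P x := by
    rcases hc : pvMp false P x with _ | _
    · have hc' : ¬ (∃ pq ∈ P.zip P.tail,
          (|pq.2 - pq.1| = 1 ∨ |pq.2 - pq.1| = 2) ∧ (x = pq.1 ∨ x = pq.2)) := by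
        intro hex
        have := (pv_mp_iff P false x).mpr (Or.inr hex)
        rw [hc] at this
        exact Bool.false_ne_true this
      rw [Bool.eq_false_iff]
      intro hcon
      rw [PySem.Set.contains_iff, pv_mem_zipfold] at hcon
      rcases hcon with hs | hex
      · simp [PySem.Set.empty] at hs
      · exact hc' hex
    · rw [pv_mp_iff] at hc
      simp only [Bool.false_eq_true, false_and, false_or] at hc
      rw [PySem.Set.contains_iff, pv_mem_zipfold]
      exact Or.inr hc
  rw [hmem]
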